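-- pv_equiv track=rewrite | github.com/waikato-datamining/wai-common | src/wai/common/json/configuration/property/_OneOfProperty.py | choose_subproperty
-- ===== SOURCE A (Python) =====
-- from typing import List, Iterable
--
-- def choose_subproperty(successes: List[bool]) -> int:
--     # Start with an invalid index
--     index = -1
--
--     # Search the list
--     for i, success in enumerate(successes):
--         if success:
--             # If a previous success occurred, we have matched multiple sub-properties
--             if index >= 0:
--                 raise ValueError(f"Value matched more than one sub-property")
--
--             index = i
--
--     if index == -1:
--         raise ValueError(f"Value didn't match any sub-properties")
--
--     return index
-- ===== SOURCE B (Python) =====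
-- from typing import List
--
-- def choose_subproperty(successes: List[bool]) -> int:
--     count = sum(successes)
--     if count > 1:
--         raise ValueError(f"Value matched more than one sub-property")
--     if count == 0:
--         raise ValueError(f"Value didn't match any sub-properties")
--     return successes.index(True)
-- ===== Notes on version B (the rewrite author's own statement) =====
-- stated objective: simpler
-- what changed: Replaces A's single guarded scan with stateful index tracking by a count-then-locate decomposition: sum the booleans, branch on the count for the two errors, then a separate list.index(True) pass.
import Mathlib
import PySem

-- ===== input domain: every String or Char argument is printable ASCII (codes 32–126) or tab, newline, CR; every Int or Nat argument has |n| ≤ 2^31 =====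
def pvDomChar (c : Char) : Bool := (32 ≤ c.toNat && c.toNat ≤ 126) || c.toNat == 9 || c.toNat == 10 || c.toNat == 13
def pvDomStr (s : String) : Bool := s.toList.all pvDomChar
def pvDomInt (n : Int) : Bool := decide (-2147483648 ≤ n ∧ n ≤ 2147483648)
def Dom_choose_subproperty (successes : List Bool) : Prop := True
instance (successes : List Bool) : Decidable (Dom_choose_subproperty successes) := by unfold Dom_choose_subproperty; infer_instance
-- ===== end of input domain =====

-- ===== PORT A =====
-- B replaces A's single guarded scan by a count pass then a separate index pass (objective: simpler).
-- Raising branches of A are modelled by `none`; outside Pre_ the result is arbitrary (getD 0).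
def chooseLoopA : List Bool → Int → Int → Option Int
  | [], _, index => if index = -1 then none else some index
  | success :: rest, i, index =>
    if success then
      if index ≥ 0 then none else chooseLoopA rest (i + 1) i
    else
      chooseLoopA rest (i + 1) index

def choose_subproperty (successes : List Bool) : Int :=
  (chooseLoopA successes 0 (-1)).getD 0

-- ===== PORT B =====
def choose_subproperty_alt (successes : List Bool) : Int :=
  let count : Int := (successes.map (fun b => if b then (1 : Int) else 0)).sum
  if count > 1 then 0        -- raise: more than one sub-property
  else if count = 0 then 0   -- raise: didn't match any
  else ((PySem.List.index? successes true).map (Int.ofNat)).getD 0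

-- ===== PRECONDITION & SPEC =====
-- Pre_ admits exactly the inputs where A returns (exactly one True); elsewhere both raise ValueError.
def Pre_choose_subproperty (successes : List Bool) : Prop := successes.count true = 1
instance (successes : List Bool) : Decidable (Pre_choose_subproperty successes) := by unfold Pre_choose_subproperty; infer_instance
def pvWitness_choose_subproperty : List Bool := [false, true, false]
def Spec_choose_subproperty (successes : List Bool) (out : Int) : Prop := out = choose_subproperty_alt successes
instance (successes : List Bool) (out : Int) : Decidable (Spec_choose_subproperty successes out) := by unfold Spec_choose_subproperty; infer_instance

-- ===== CLAIM (what is proved, stated in full; the proofs are below) =====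
def Claim_equal_choose_subproperty : Prop := ∀ (successes : List Bool), Dom_choose_subproperty successes → Pre_choose_subproperty successes → Spec_choose_subproperty successes (choose_subproperty successes)

-- ===== LEMMAS AND PROOFS =====

theorem chooseLoopA_all_false (s : List Bool) (i idx : Int) (h : s.count true = 0) :
    chooseLoopA s i idx = if idx = -1 then none else some idx := by
  induction s generalizing i with
  | nil => rfl
  | cons b rest ih =>
    cases b with
    | false => simp [List.count_cons] at h; simpa [chooseLoopA] using ih (i+1) h
    | true => simp [List.count_cons] at h

theorem chooseLoopA_one (s : List Bool) (i : Int) (hi : 0 ≤ i) (h : s.count true = 1) :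
    chooseLoopA s i (-1) = (PySem.List.index? s true).map (fun k => (k : Int) + i) := by
  induction s generalizing i with
  | nil => simp [List.count_nil] at h
  | cons b rest ih =>
    cases b with
    | true =>
      simp [List.count_cons] at h
      rw [PySem.List.index?_cons_self]
      show (if ((-1 : Int) ≥ 0) then none else chooseLoopA rest (i+1) i)
          = Option.map (fun k => (k : Int) + i) (some 0)
      rw [if_neg (by omega), chooseLoopA_all_false rest (i+1) i h,
          if_neg (by omega)]
      simp
    | false =>
      simp [List.count_cons] at h
      rw [PySem.List.index?_cons_of_ne (x := false) (v := true) (xs := rest) (by simp),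
          show chooseLoopA (false :: rest) i (-1) = chooseLoopA rest (i+1) (-1) from rfl,
          ih (i+1) (by omega) h]
      cases PySem.List.index? rest true with
      | none => rfl
      | some k => simp; push_cast; ring

theorem sum_map_ite_eq_count (s : List Bool) :
    (s.map (fun b => if b then (1 : Int) else 0)).sum = (s.count true : Int) := by
  induction s with
  | nil => rfl
  | cons b rest ih =>
    cases b <;> simp [ih] <;> omega

-- ===== VERDICT (by name: the statement is the Claim_ definition above) =====
theorem choose_subproperty_spec : Claim_equal_choose_subproperty := by
  intro s _ hpre
  unfold Pre_choose_subproperty at hpre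
  unfold Spec_choose_subproperty choose_subproperty choose_subproperty_alt
  rw [chooseLoopA_one s 0 (by omega) hpre, sum_map_ite_eq_count]
  have hmem : true ∈ s := by
    by_contra hm
    rw [List.count_eq_zero_of_not_mem hm] at hpre
    exact absurd hpre (by omega)
  have : (PySem.List.index? s true).isSome := (PySem.List.index?_isSome_iff s true).2 hmem
  obtain ⟨k, hk⟩ := Option.isSome_iff_exists.1 this
  rw [hpre, hk]
  norm_num
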